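-- pv_equiv track=rewrite | github.com/rachellea/sarle-labeler | src/load.py | full_clean_cxr
-- ===== SOURCE A (Python) =====
-- import string
--
-- def full_clean_cxr(sentence):
--     """Removes whitespace from beginning and end of a sentence. Lowercases.
--     Replaces punctuation (except periods) with a space. Removes multiple spaces."""
--     sentence = sentence.strip()
--     sentence = sentence.lower()
--
--     #replace punctuation with a space
--     for punc in string.punctuation.replace('.',''): #for all punctuation except a period
--         sentence = sentence.replace(punc,' ')
--
--     #replace multiple whitespace with single
--     sentence = ' '.join(sentence.split())
--
--     #remove period from the end of sentence (don't remove all periods to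
--     #preserve decimal measurements of lesions)
--     sentence = sentence.strip('. ')
--     return sentence
-- ===== SOURCE B (Python) =====
-- import string
--
-- _PUNC = set(string.punctuation) - {'.'}
--
-- def full_clean_cxr(sentence):
--     """Single pass: map each non-period punctuation char to a space, then
--     collapse whitespace and strip trailing/leading periods and spaces."""
--     sentence = ''.join(' ' if ch in _PUNC else ch for ch in sentence.strip().lower())
--     sentence = ' '.join(sentence.split())
--     return sentence.strip('. ')
-- ===== Notes on version B (the rewrite author's own statement) =====
-- stated objective: idiomatic
-- what changed: A loops over the 31 non-period punctuation characters and rescans the whole sentence with str.replace for each; B precomputes the punctuation set once and replaces them in a single membership-filtered pass over the characters.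
import Mathlib
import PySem

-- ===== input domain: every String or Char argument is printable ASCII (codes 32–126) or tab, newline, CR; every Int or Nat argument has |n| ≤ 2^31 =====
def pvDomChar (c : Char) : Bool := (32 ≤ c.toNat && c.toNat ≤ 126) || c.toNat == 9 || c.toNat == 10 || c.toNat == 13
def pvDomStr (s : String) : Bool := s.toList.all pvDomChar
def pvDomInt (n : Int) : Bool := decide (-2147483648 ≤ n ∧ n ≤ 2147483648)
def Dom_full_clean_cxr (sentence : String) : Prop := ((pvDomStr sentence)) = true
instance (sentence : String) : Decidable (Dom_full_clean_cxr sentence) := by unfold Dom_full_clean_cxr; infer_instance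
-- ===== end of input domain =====

-- B replaces A's 31 whole-string .replace passes (one per punctuation char) with a single
-- membership-filtered pass over the characters; equivalence of the return values is proved below.

-- ===== PORT A =====
-- string.punctuation
def pyPunctuation : String := "!\"#$%&'()*+,-./:;<=>?@[\\]^_`{|}~"

def full_clean_cxr (sentence : String) : String :=
  let s1 := PySem.Str.strip sentence
  let s2 := PySem.Str.lower s1
  -- for punc in string.punctuation.replace('.',''): sentence = sentence.replace(punc, ' ')
  let s3 := (PySem.Str.replace pyPunctuation "." "").toList.foldl
      (fun s punc => PySem.Str.replace s (String.ofList [punc]) " ") s2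
  let s4 := PySem.Str.join " " (PySem.Str.split₀ s3)
  PySem.Str.stripChars s4 ". "

-- ===== PORT B =====
-- _PUNC = set(string.punctuation) - {'.'}
def puncSet : PySem.Set Char :=
  PySem.Set.diff (PySem.Set.ofList pyPunctuation.toList) (PySem.Set.ofList ['.'])

def full_clean_cxr_alt (sentence : String) : String :=
  -- ''.join(' ' if ch in _PUNC else ch for ch in sentence.strip().lower())
  let s := String.ofList ((PySem.Str.lower (PySem.Str.strip sentence)).toList.map
      (fun ch => if puncSet.contains ch then ' ' else ch))
  let s2 := PySem.Str.join " " (PySem.Str.split₀ s)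
  PySem.Str.stripChars s2 ". "

-- ===== PRECONDITION & SPEC =====
def Spec_full_clean_cxr (sentence : String) (out : String) : Prop := out = full_clean_cxr_alt sentence
instance (sentence : String) (out : String) : Decidable (Spec_full_clean_cxr sentence out) := by unfold Spec_full_clean_cxr; infer_instance

-- ===== CLAIM (what is proved, stated in full; the proofs are below) =====
def Claim_equal_full_clean_cxr : Prop := ∀ (sentence : String), Dom_full_clean_cxr sentence → Spec_full_clean_cxr sentence (full_clean_cxr sentence)

-- ===== LEMMAS AND PROOFS =====

-- Replacing a single character a by a single character b is a map over the characters.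
theorem go_single (a b : Char) : ∀ (l : List Char) (fuel : Nat) (acc : List Char), l.length ≤ fuel →
    PySem.Chars.replace.go [a] [b] fuel l acc = acc.reverse ++ l.map (fun c => if c = a then b else c)
  | [], 0, acc, _ => by simp [PySem.Chars.replace.go]
  | [], fuel+1, acc, _ => by simp [PySem.Chars.replace.go]
  | c :: t, fuel+1, acc, h => by
    rw [PySem.Chars.replace.go]
    by_cases hc : c = a
    · have hp : [a].isPrefixOf (c :: t) = true := by simp [List.isPrefixOf, hc]
      simp only [hp, if_pos, List.length_cons, List.length_nil, List.drop_succ_cons,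
        List.drop_zero, List.reverse_cons, List.reverse_nil, List.nil_append]
      rw [show ([b] ++ acc : List Char) = b :: acc from rfl,
        go_single a b t fuel (b :: acc) (by simpa using h)]
      simp [hc]
    · have hp : [a].isPrefixOf (c :: t) = false := by
        simp [List.isPrefixOf]; exact fun h' => hc h'.symm
      simp only [hp, Bool.false_eq_true, if_false]
      rw [go_single a b t fuel (c :: acc) (by simpa using h)]
      simp [hc]

theorem replace_single (a b : Char) (s : List Char) :
    PySem.Chars.replace s [a] [b] = s.map (fun c => if c = a then b else c) := by
  rw [PySem.Chars.replace]
  simpa using go_single a b s s.length [] le_rfl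

-- A's loop of string replaces, read on the character-list side.
theorem foldl_replace_toList (ps : List Char) (s0 : String) :
    (ps.foldl (fun s p => PySem.Str.replace s (String.ofList [p]) " ") s0).toList
      = ps.foldl (fun l p => PySem.Chars.replace l [p] [' ']) s0.toList := by
  induction ps generalizing s0 with
  | nil => rfl
  | cons p ps ih => simp [List.foldl_cons, ih]

-- A fold of single-character replacement maps (target ' ' not itself replaced) is one membership map.
theorem foldl_map_mem (ps : List Char) (h : ' ' ∉ ps) (s : List Char) :
    ps.foldl (fun l p => l.map (fun c => if c = p then ' ' else c)) s
      = s.map (fun c => if c ∈ ps then ' ' else c) := by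
  induction ps generalizing s with
  | nil => simp
  | cons p ps ih =>
    rw [List.foldl_cons, ih (by simp at h; exact h.2), List.map_map]
    apply List.map_congr_left
    intro c _
    by_cases hc : c = p
    · subst hc
      simp at h
      simp
    · simp [Function.comp, hc, List.mem_cons]

-- The middle of both pipelines agree as strings.
theorem mid_eq (s2 : String) :
    ((PySem.Str.replace pyPunctuation "." "").toList.foldl
        (fun s p => PySem.Str.replace s (String.ofList [p]) " ") s2)
      = String.ofList (s2.toList.map (fun ch => if puncSet.contains ch then ' ' else ch)) := by
  apply String.toList_inj.mp
  rw [foldl_replace_toList]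
  have hps : (PySem.Str.replace pyPunctuation "." "").toList
      = "!\"#$%&'()*+,-/:;<=>?@[\\]^_`{|}~".toList := by decide
  rw [hps]
  simp only [replace_single]
  rw [foldl_map_mem _ (by decide)]
  have hset : puncSet = "!\"#$%&'()*+,-/:;<=>?@[\\]^_`{|}~".toList := by decide
  simp only [hset, String.toList_ofList]
  apply List.map_congr_left
  intro c _
  simp

-- ===== VERDICT (by name: the statement is the Claim_ definition above) =====
theorem full_clean_cxr_spec : Claim_equal_full_clean_cxr := by
  intro sentence _
  unfold Spec_full_clean_cxr full_clean_cxr full_clean_cxr_alt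
  simp only [mid_eq]
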